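-- pv_equiv track=rewrite | github.com/nickchen111/Leetcode | Greedy/3727. Maximum Alternating Sum of Squares.py | maxAlternatingSum
-- ===== SOURCE A (Python) =====
-- from typing import List
--
-- def maxAlternatingSum(nums: List[int]) -> int:
--     n = len(nums)
--     for i in range(n):
--         nums[i] = abs(nums[i])
--     nums.sort()
--     i = 0
--     j = n - 1
--     ans = 0
--     while i < j:
--         ans += nums[j] * nums[j]
--         ans -= nums[i] * nums[i]
--         i += 1
--         j -= 1
--     if n % 2:
--         ans += nums[i] * nums[i]
--     return ans
-- ===== SOURCE B (Python) =====
-- def maxAlternatingSum(nums):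
--     # No sorting: the answer is total - 2*(sum of the n//2 smallest squares);
--     # extract the minimum square n//2 times (partial selection).
--     sq = [x * x for x in nums]
--     total = sum(sq)
--     low = 0
--     for _ in range(len(sq) // 2):
--         v = min(sq)
--         low += v
--         sq.remove(v)
--     return total - 2 * low
-- ===== Notes on version B (the rewrite author's own statement) =====
-- stated objective: alternative
-- what changed: A takes absolute values in place, fully sorts, and runs a two-pointer loop from both ends with an odd-length fixup; B never sorts: it computes the total of the squares and then extracts the minimum square n//2 times (partial selection by repeated min/remove), returning total - 2*low; B also does not mutate the input list.
import Mathlib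
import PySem

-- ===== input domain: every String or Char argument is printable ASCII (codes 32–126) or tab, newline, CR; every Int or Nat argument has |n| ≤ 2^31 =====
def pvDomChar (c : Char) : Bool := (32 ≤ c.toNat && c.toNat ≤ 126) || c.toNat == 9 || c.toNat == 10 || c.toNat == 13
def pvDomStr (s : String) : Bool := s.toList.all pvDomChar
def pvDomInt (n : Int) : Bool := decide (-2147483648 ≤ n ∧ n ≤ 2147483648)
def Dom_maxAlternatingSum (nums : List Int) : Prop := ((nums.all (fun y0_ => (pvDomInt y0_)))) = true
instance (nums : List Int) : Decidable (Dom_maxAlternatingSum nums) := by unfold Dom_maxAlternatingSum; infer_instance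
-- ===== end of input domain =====

-- B replaces A's in-place abs pass, full sort and two-pointer loop by a sort-free partial
-- selection: total of the squares minus twice the sum of the n//2 smallest squares, the latter
-- obtained by extracting the minimum n//2 times (objective: alternative, not faster).
-- Equivalence is about the RETURN value only: Python A mutates its argument in place, B does not.

-- ===== PORT A =====
-- the while loop: returns the final (i, ans); all index accesses are in range when executed
def pvLoopA (s : List Int) (i j ans : Int) : Int × Int :=
  if i < j then
    pvLoopA s (i + 1) (j - 1)
      (ans + PySem.List.pyGetD s j 0 * PySem.List.pyGetD s j 0
           - PySem.List.pyGetD s i 0 * PySem.List.pyGetD s i 0)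
  else (i, ans)
termination_by (j - i).toNat
decreasing_by omega

def maxAlternatingSum (nums : List Int) : Int :=
  -- for i in range(n): nums[i] = abs(nums[i])  — pointwise update of every entry
  let a := nums.map (fun x => |x|)
  let s := PySem.List.sorted a (fun x => x)
  let n : Int := (s.length : Int)
  let p := pvLoopA s 0 (n - 1) 0
  if PySem.Int.mod n 2 ≠ 0 then
    p.2 + PySem.List.pyGetD s p.1 0 * PySem.List.pyGetD s p.1 0
  else p.2

-- ===== PORT B =====
-- the selection loop: k times (v = min(sq); low += v; sq.remove(v)); min of [] would raise,
-- but the loop runs len(sq)//2 ≤ len(sq) times, so the 'none' branch is never reached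
def pvLoopB : Nat → List Int → Int → Int
  | 0, _, low => low
  | k + 1, sq, low =>
    match PySem.List.min? sq (fun x => x) with
    | some v => pvLoopB k (sq.erase v) (low + v)  -- sq.remove(v): erase first occurrence (v ∈ sq)
    | none => low

def maxAlternatingSum_alt (nums : List Int) : Int :=
  let sq := nums.map (fun x => x * x)
  let total := sq.sum
  let low := pvLoopB (sq.length / 2) sq 0
  total - 2 * low

-- ===== PRECONDITION & SPEC =====
def Spec_maxAlternatingSum (nums : List Int) (out : Int) : Prop := out = maxAlternatingSum_alt nums
instance (nums : List Int) (out : Int) : Decidable (Spec_maxAlternatingSum nums out) := by unfold Spec_maxAlternatingSum; infer_instance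

-- ===== CLAIM (what is proved, stated in full; the proofs are below) =====
def Claim_equal_maxAlternatingSum : Prop := ∀ (nums : List Int), Dom_maxAlternatingSum nums → Spec_maxAlternatingSum nums (maxAlternatingSum nums)

-- ===== LEMMAS AND PROOFS =====

def pvSumsq (l : List Int) : Int := (l.map (fun x => x * x)).sum

theorem pvSumsq_cons (x : Int) (l : List Int) : pvSumsq (x :: l) = x * x + pvSumsq l := by
  simp [pvSumsq]

theorem pvSumsq_append_singleton (l : List Int) (x : Int) :
    pvSumsq (l ++ [x]) = pvSumsq l + x * x := by
  simp [pvSumsq]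

-- sorting the squares equals squaring the sorted absolute values
theorem pv_sorted_sq (nums : List Int) :
    PySem.List.sorted (nums.map (fun x => x * x)) (fun x => x)
      = (PySem.List.sorted (nums.map (fun x => |x|)) (fun x => x)).map (fun x => x * x) := by
  apply PySem.List.sorted_id_eq_of_perm_of_pairwise
  · have h := (PySem.List.sorted_perm (nums.map (fun x => |x|)) (fun x => x) false).map
      (fun x => x * x)
    have h2 : (nums.map (fun x => |x|)).map (fun x => x * x) = nums.map (fun x => x * x) := by
      simp [List.map_map, Function.comp_def, abs_mul_abs_self]
    exact h2 ▸ h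
  · have hp := PySem.List.sorted_pairwise (nums.map (fun x => |x|)) (fun x => x)
    have hnn : ∀ x ∈ PySem.List.sorted (nums.map (fun x => |x|)) (fun x => x), 0 ≤ x := by
      intro x hx
      rw [PySem.List.mem_sorted] at hx
      obtain ⟨y, _, rfl⟩ := List.mem_map.mp hx
      exact abs_nonneg y
    rw [List.pairwise_map]
    refine hp.imp_of_mem ?_
    intro a b ha hb hab
    exact mul_le_mul hab hab (hnn a ha) (le_trans (hnn a ha) hab)

-- closed form of the two-pointer loop on the segment s[i..j]
theorem pvLoopA_eq (s : List Int) (d : Nat) :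
    ∀ (i j ans : Int), 0 ≤ i → i + d = j + 1 → j < (s.length : Int) →
      pvLoopA s i j ans
        = ((i + (d / 2 : Nat)),
           ans + pvSumsq (((s.drop i.toNat).take d).drop (d - d / 2))
               - pvSumsq (((s.drop i.toNat).take d).take (d / 2))) := by
  induction d using Nat.strong_induction_on with
  | _ d ih =>
    intro i j ans hi hd hj
    match d, ih with
    | 0, _ =>
      rw [pvLoopA]
      rw [if_neg (by omega)]
      simp [pvSumsq]
    | 1, _ =>
      rw [pvLoopA]
      rw [if_neg (by omega)]
      simp [pvSumsq]
    | (k + 2), ih =>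
      have hlt : i < j := by omega
      have ha : i.toNat < s.length := by omega
      have hb : i.toNat + k + 1 < s.length := by omega
      have hjt : j.toNat = i.toNat + k + 1 := by omega
      rw [pvLoopA, if_pos hlt]
      rw [ih k (by omega) (i + 1) (j - 1) _ (by omega) (by omega) (by omega)]
      have hgi : PySem.List.pyGetD s i 0 = s[i.toNat] :=
        PySem.List.pyGetD_eq_getElem s 0 hi (by omega)
      have hgj : PySem.List.pyGetD s j 0 = s[i.toNat + k + 1]'hb := by
        rw [PySem.List.pyGetD_eq_getElem s 0 (by omega) (by omega)]
        simp [hjt]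
      have hi1 : (i + 1).toNat = i.toNat + 1 := by omega
      -- the segment of length k+2 decomposes as head :: middle ++ [last]
      have hdropcons : s.drop i.toNat = s[i.toNat] :: s.drop (i.toNat + 1) :=
        List.drop_eq_getElem_cons ha
      have hmidlast : (s.drop (i.toNat + 1)).take (k + 1)
          = (s.drop (i.toNat + 1)).take k ++ [s[i.toNat + k + 1]'hb] := by
        rw [List.take_add_one]
        congr 1
        rw [List.getElem?_drop]
        have hlt' : i.toNat + 1 + k < s.length := by omega
        simp [List.getElem?_eq_getElem hlt']
        congr 1
        omega
      have hmin1 : min (k / 2 + 1) (k + 2) = k / 2 + 1 := by omega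
      have hmin2 : min (k / 2) k = k / 2 := by omega
      have h21 : (k + 2) / 2 = k / 2 + 1 := by omega
      have hE1 : ((s.drop i.toNat).take (k + 2)).take ((k + 2) / 2)
          = s[i.toNat] :: ((s.drop (i.toNat + 1)).take k).take (k / 2) := by
        rw [hdropcons, h21, List.take_take, hmin1, List.take_succ_cons,
          List.take_take, hmin2]
      have hE2 : ((s.drop i.toNat).take (k + 2)).drop ((k + 2) - (k + 2) / 2)
          = ((s.drop (i.toNat + 1)).take k).drop (k - k / 2) ++ [s[i.toNat + k + 1]'hb] := by
        rw [hdropcons]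
        have h22 : (k + 2) - (k + 2) / 2 = (k - k / 2) + 1 := by omega
        rw [h22, List.take_succ_cons, List.drop_succ_cons, hmidlast]
        rw [List.drop_append_of_le_length (by simp; omega)]
      rw [hE1, hE2, pvSumsq_cons, pvSumsq_append_singleton, hgi, hgj, hi1]
      simp only [Prod.mk.injEq]
      exact ⟨by omega, by ring⟩

-- the whole of A in closed form: top-half square sum minus bottom-half square sum of the sorted list
theorem pvA_closed (s : List Int) :
    (if PySem.Int.mod (s.length : Int) 2 ≠ 0 then
       (pvLoopA s 0 ((s.length : Int) - 1) 0).2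
         + PySem.List.pyGetD s (pvLoopA s 0 ((s.length : Int) - 1) 0).1 0
           * PySem.List.pyGetD s (pvLoopA s 0 ((s.length : Int) - 1) 0).1 0
     else (pvLoopA s 0 ((s.length : Int) - 1) 0).2)
      = pvSumsq (s.drop (s.length / 2)) - pvSumsq (s.take (s.length / 2)) := by
  have hloop := pvLoopA_eq s s.length 0 ((s.length : Int) - 1) 0 le_rfl (by omega) (by omega)
  simp only [Int.toNat_zero, List.drop_zero, List.take_length, zero_add] at hloop
  rw [hloop]
  have hmod : PySem.Int.mod (s.length : Int) 2 = ((s.length % 2 : Nat) : Int) := by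
    exact_mod_cast PySem.Int.mod_natCast s.length 2
  rw [hmod]
  by_cases hpar : s.length % 2 = 0
  · rw [if_neg (by simp [hpar])]
    have hdd : s.length - s.length / 2 = s.length / 2 := by omega
    rw [hdd]
  · rw [if_pos (by exact_mod_cast hpar)]
    have hdd : s.length - s.length / 2 = s.length / 2 + 1 := by omega
    have hmidlt : s.length / 2 < s.length := by omega
    have hget : PySem.List.pyGetD s ((s.length / 2 : Nat) : Int) 0 = s[s.length / 2] := by
      rw [PySem.List.pyGetD_natCast]
      exact List.getD_eq_getElem s 0 hmidlt
    have hdropmid : s.drop (s.length / 2) = s[s.length / 2] :: s.drop (s.length / 2 + 1) :=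
      List.drop_eq_getElem_cons hmidlt
    rw [hdd, hget, hdropmid, pvSumsq_cons]
    ring

-- removing the minimum is popping the head of the sorted list
theorem pv_sorted_erase_min (l : List Int) (v : Int)
    (hm : PySem.List.min? l (fun x => x) = some v) :
    PySem.List.sorted l (fun x => x) = v :: PySem.List.sorted (l.erase v) (fun x => x) := by
  have hvmem : v ∈ l := PySem.List.min?_mem hm
  apply PySem.List.sorted_id_eq_of_perm_of_pairwise
  · exact ((PySem.List.sorted_perm (l.erase v) (fun x => x) false).cons v).trans
      (List.perm_cons_erase hvmem).symm
  · refine List.pairwise_cons.mpr ⟨?_, PySem.List.sorted_pairwise (l.erase v) (fun x => x)⟩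
    intro y hy
    rw [PySem.List.mem_sorted] at hy
    exact PySem.List.min?_isMin hm y (List.mem_of_mem_erase hy)

-- the selection loop sums the first k elements of the sorted list
theorem pvLoopB_eq (k : Nat) : ∀ (l : List Int) (low : Int), k ≤ l.length →
    pvLoopB k l low = low + ((PySem.List.sorted l (fun x => x)).take k).sum := by
  induction k with
  | zero => intro l low _; simp [pvLoopB]
  | succ k ih =>
    intro l low hk
    obtain ⟨a, t, rfl⟩ : ∃ a t, l = a :: t := by
      cases l with
      | nil => simp at hk
      | cons a t => exact ⟨a, t, rfl⟩
    have hv : PySem.List.min? (a :: t) (fun x => x) = some (t.foldl min a) :=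
      PySem.List.min?_id_cons a t
    have hvmem : t.foldl min a ∈ a :: t := PySem.List.min?_mem hv
    have hlen : ((a :: t).erase (t.foldl min a)).length = (a :: t).length - 1 :=
      List.length_erase_of_mem hvmem
    rw [pvLoopB, hv]
    show pvLoopB k ((a :: t).erase (t.foldl min a)) (low + t.foldl min a) = _
    rw [ih _ (low + t.foldl min a) (by rw [hlen]; simp only [List.length_cons] at hk ⊢; omega),
      pv_sorted_erase_min _ _ hv, List.take_succ_cons, List.sum_cons]
    ring

-- ===== VERDICT (by name: the statement is the Claim_ definition above) =====
theorem maxAlternatingSum_spec : Claim_equal_maxAlternatingSum := by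
  intro nums _
  show maxAlternatingSum nums = maxAlternatingSum_alt nums
  simp only [maxAlternatingSum, maxAlternatingSum_alt]
  set sq := nums.map (fun x => x * x) with hsq
  set T := PySem.List.sorted sq (fun x => x) with hT
  have hperm : T.Perm sq := PySem.List.sorted_perm sq (fun x => x) false
  have hTlen : T.length = sq.length := hperm.length_eq
  rw [pvLoopB_eq (sq.length / 2) sq 0 (by omega), ← hT]
  have hsum : sq.sum = T.sum := (hperm.sum_eq).symm
  have hsplit : T.sum = (T.take (sq.length / 2)).sum + (T.drop (sq.length / 2)).sum := by
    conv_lhs => rw [← List.take_append_drop (sq.length / 2) T]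
    rw [List.sum_append]
  rw [pvA_closed]
  have hmapsq : T = (PySem.List.sorted (nums.map (fun x => |x|)) (fun x => x)).map
      (fun x => x * x) := by rw [hT, hsq]; exact pv_sorted_sq nums
  have hSlen : (PySem.List.sorted (nums.map (fun x => |x|)) (fun x => x)).length = sq.length := by
    have h := congrArg List.length hmapsq
    rw [List.length_map] at h
    omega
  rw [hSlen]
  have h1 : pvSumsq ((PySem.List.sorted (nums.map (fun x => |x|)) (fun x => x)).drop
      (sq.length / 2)) = (T.drop (sq.length / 2)).sum := by
    rw [hmapsq, pvSumsq]; simp [List.map_drop]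
  have h2 : pvSumsq ((PySem.List.sorted (nums.map (fun x => |x|)) (fun x => x)).take
      (sq.length / 2)) = (T.take (sq.length / 2)).sum := by
    rw [hmapsq, pvSumsq]; simp [List.map_take]
  rw [h1, h2, hsum, hsplit]
  ring
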